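-- pv_equiv track=rewrite | github.com/jwalin-shah/robo-replan | server/app.py | _fallback_action
-- ===== SOURCE A (Python) =====
-- def _fallback_action(valid: list[str]) -> str:
--     if not valid:
--         return "SCAN_SCENE"
--     priority = [
--         "PLACE_BIN_A", "PLACE_BIN_B",
--         "PICK",
--         "CLEAR_BLOCKER",
--         "MOVE_TO_RED", "MOVE_TO_BLUE", "MOVE_TO_GREEN", "MOVE_TO_YELLOW", "MOVE_TO_PURPLE",
--         "MOVE_NORTH", "MOVE_SOUTH", "MOVE_EAST", "MOVE_WEST",
--         "ROTATE_LEFT", "ROTATE_RIGHT",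
--         "SCAN_SCENE",
--     ]
--     for p in priority:
--         if p in valid:
--             return p
--     return valid[0]
-- ===== SOURCE B (Python) =====
-- def _fallback_action(valid: list[str]) -> str:
--     if not valid:
--         return "SCAN_SCENE"
--     priority = [
--         "PLACE_BIN_A", "PLACE_BIN_B",
--         "PICK",
--         "CLEAR_BLOCKER",
--         "MOVE_TO_RED", "MOVE_TO_BLUE", "MOVE_TO_GREEN", "MOVE_TO_YELLOW", "MOVE_TO_PURPLE",
--         "MOVE_NORTH", "MOVE_SOUTH", "MOVE_EAST", "MOVE_WEST",
--         "ROTATE_LEFT", "ROTATE_RIGHT",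
--         "SCAN_SCENE",
--     ]
--     rank = {p: i for i, p in enumerate(priority)}
--     return min(valid, key=lambda a: rank.get(a, len(priority)))
-- ===== Notes on version B (the rewrite author's own statement) =====
-- stated objective: simpler
-- what changed: Instead of scanning the 16-entry priority list and membership-testing each entry against valid, B builds a rank lookup table once and takes min(valid, key=rank) in a single pass over valid; min's left-stable tie-break on the sentinel rank reproduces the valid[0] fallback.
import Mathlib
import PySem

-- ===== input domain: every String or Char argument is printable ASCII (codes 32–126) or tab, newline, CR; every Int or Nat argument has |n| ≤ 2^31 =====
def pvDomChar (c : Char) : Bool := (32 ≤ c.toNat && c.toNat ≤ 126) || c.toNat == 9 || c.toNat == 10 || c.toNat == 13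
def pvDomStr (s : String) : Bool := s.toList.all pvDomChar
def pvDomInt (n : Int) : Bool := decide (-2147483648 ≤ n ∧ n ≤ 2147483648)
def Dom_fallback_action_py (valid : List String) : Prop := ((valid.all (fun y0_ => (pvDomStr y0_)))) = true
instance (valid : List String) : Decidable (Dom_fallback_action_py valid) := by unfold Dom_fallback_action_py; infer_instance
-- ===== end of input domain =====

-- B replaces A's scan of the priority list (membership-testing each entry against valid)
-- by a rank lookup table and a single left-stable min over valid; objective: simpler.


-- ===== PORT A =====
-- the module-level priority list (identical literal in A and B)
def pvPriority : List String :=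
  [ "PLACE_BIN_A", "PLACE_BIN_B",
    "PICK",
    "CLEAR_BLOCKER",
    "MOVE_TO_RED", "MOVE_TO_BLUE", "MOVE_TO_GREEN", "MOVE_TO_YELLOW", "MOVE_TO_PURPLE",
    "MOVE_NORTH", "MOVE_SOUTH", "MOVE_EAST", "MOVE_WEST",
    "ROTATE_LEFT", "ROTATE_RIGHT",
    "SCAN_SCENE" ]

-- A's loop: 'for p in priority: if p in valid: return p' with 'return valid[0]' after it
def pvALoop (valid : List String) (v0 : String) : List String → String
  | [] => v0
  | p :: rest => if valid.contains p then p else pvALoop valid v0 rest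

def fallback_action_py (valid : List String) : String :=
  match valid with
  | [] => "SCAN_SCENE"                    -- if not valid: return "SCAN_SCENE"
  | v0 :: _ => pvALoop valid v0 pvPriority -- valid[0] is v0 (valid nonempty here)

-- ===== PORT B =====
def fallback_action_py_alt (valid : List String) : String :=
  match valid with
  | [] => "SCAN_SCENE"
  | v0 :: _ =>
    -- rank = {p: i for i, p in enumerate(priority)}
    let rank : PySem.Dict String Int :=
      (PySem.List.enumerate pvPriority 0).foldl (fun d ip => d.insert ip.2 ip.1) ∅
    -- min(valid, key=lambda a: rank.get(a, len(priority)))  (valid nonempty, so min? is some)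
    (PySem.List.min? valid (fun a => rank.getD a 16)).getD v0

-- ===== PRECONDITION & SPEC =====
def Spec_fallback_action_py (valid : List String) (out : String) : Prop := out = fallback_action_py_alt valid
instance (valid : List String) (out : String) : Decidable (Spec_fallback_action_py valid out) := by unfold Spec_fallback_action_py; infer_instance

-- ===== CLAIM (what is proved, stated in full; the proofs are below) =====
def Claim_equal_fallback_action_py : Prop := ∀ (valid : List String), Dom_fallback_action_py valid → Spec_fallback_action_py valid (fallback_action_py valid)

-- ===== LEMMAS AND PROOFS =====

-- min?'s underlying fold (first extremal element), exposed for the invariants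
def pvMinFold (k : String → Int) (acc : Option String) : List String → Option String
  | [] => acc
  | x :: xs =>
    match acc with
    | none => pvMinFold k (some x) xs
    | some m => if k x < k m then pvMinFold k (some x) xs else pvMinFold k (some m) xs

theorem foldl_eq_pvMinFold (k : String → Int) (f : Option String → String → Option String)
    (hn : ∀ x, f none x = some x)
    (hs : ∀ m x, f (some m) x = if k x < k m then some x else some m) :
    ∀ (l : List String) (acc : Option String), l.foldl f acc = pvMinFold k acc l := by
  intro l
  induction l with
  | nil => intro acc; rfl
  | cons x xs ih =>
    intro acc
    cases acc with
    | none => simp [pvMinFold, hn, ih]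
    | some m =>
      by_cases h : k x < k m
      · simp [pvMinFold, h, hs, ih]
      · simp [pvMinFold, h, hs, ih]

theorem min?_eq_pvMinFold (k : String → Int) (l : List String) :
    PySem.List.min? l k = pvMinFold k none l := by
  unfold PySem.List.min?
  exact foldl_eq_pvMinFold k _ (fun x => rfl) (fun m x => rfl) l none

-- the rank dict built from enumerate gives exactly idxOf (absent keys get the length)
theorem rank_getD (ps : List String) (s : Int) (d : PySem.Dict String Int) (a : String)
    (hnd : ps.Nodup) :
    ((PySem.List.enumerate ps s).foldl (fun dd ip => dd.insert ip.2 ip.1) d).getD a 16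
      = if a ∈ ps then s + (ps.idxOf a : Int) else d.getD a 16 := by
  induction ps generalizing s d with
  | nil => simp [PySem.List.enumerate_nil]
  | cons p t ih =>
    have hnd' : t.Nodup := hnd.of_cons
    have hpt : p ∉ t := (List.nodup_cons.mp hnd).1
    rw [PySem.List.enumerate_cons, List.foldl_cons, ih _ _ hnd']
    by_cases hap : a = p
    · subst hap
      simp [hpt]
    · by_cases hat : a ∈ t
      · simp [hat, hap, Ne.symm hap]
        ring
      · simp [hat, hap, PySem.Dict.getD_insert]

-- keys all ≥ the acc key on the rest: the fold keeps acc
theorem pvMinFold_stable (k : String → Int) (m : String) (l : List String)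
    (h : ∀ x ∈ l, ¬ k x < k m) : pvMinFold k (some m) l = some m := by
  induction l with
  | nil => rfl
  | cons x xs ih =>
    have hx := h x (by simp)
    simp [pvMinFold, hx]
    exact ih (fun y hy => h y (by simp [hy]))

-- key p is the unique strict minimum: the fold lands on p
theorem pvMinFold_unique_min (k : String → Int) (p : String)
    (hk0 : k p = 0) (hk1 : ∀ x, x ≠ p → 1 ≤ k x) :
    ∀ (l : List String) (acc : Option String),
      (p ∈ l ∨ acc = some p) → pvMinFold k acc l = some p := by
  intro l
  induction l with
  | nil =>
    rintro acc (h | h)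
    · simp at h
    · simpa [pvMinFold] using h
  | cons x xs ih =>
    rintro acc hmem
    cases acc with
    | none =>
      rcases hmem with hmem | hmem
      · by_cases hxp : x = p
        · exact ih (some x) (Or.inr (by rw [hxp]))
        · have : p ∈ xs := by
            rcases List.mem_cons.mp hmem with h | h
            · exact absurd h.symm hxp
            · exact h
          exact ih (some x) (Or.inl this)
      · exact absurd hmem (by simp)
    | some m =>
      by_cases hmp : m = p
      · have hnlt : ¬ k x < k m := by
          by_cases hxp : x = p
          · simp [hxp, hmp]
          · have := hk1 x hxp; rw [hmp, hk0]; omega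
        simp only [pvMinFold, if_neg hnlt]
        exact ih (some m) (Or.inr (by rw [hmp]))
      · by_cases hxp : x = p
        · have hlt : k x < k m := by
            have h1 := hk1 m hmp
            rw [hxp, hk0]; omega
          simp only [pvMinFold, if_pos hlt]
          exact ih (some x) (Or.inr (by rw [hxp]))
        · have hpxs : p ∈ xs := by
            rcases hmem with hmem | hmem
            · rcases List.mem_cons.mp hmem with h | h
              · exact absurd h.symm hxp
              · exact h
            · exact absurd hmem (by simp [hmp])
          by_cases hlt : k x < k m
          · simp only [pvMinFold, if_pos hlt]
            exact ih (some x) (Or.inl hpxs)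
          · simp only [pvMinFold, if_neg hlt]
            exact ih (some m) (Or.inl hpxs)

-- comparison-preserving key change does not change the fold
theorem pvMinFold_congr (P : String → Prop) (k k' : String → Int)
    (hkk : ∀ x y, P x → P y → (k' x < k' y ↔ k x < k y)) :
    ∀ (l : List String) (m : String), P m → (∀ x ∈ l, P x) →
      pvMinFold k' (some m) l = pvMinFold k (some m) l := by
  intro l
  induction l with
  | nil => intros; rfl
  | cons x xs ih =>
    intro m hm hl
    have hx : P x := hl x (by simp)
    have hiff := hkk x m hx hm
    by_cases hlt : k x < k m
    · simp only [pvMinFold, if_pos hlt, if_pos (hiff.mpr hlt)]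
      exact ih x hx (fun y hy => hl y (by simp [hy]))
    · simp only [pvMinFold, if_neg hlt, if_neg (fun h => hlt (hiff.mp h))]
      exact ih m hm (fun y hy => hl y (by simp [hy]))

-- main invariant: A's scan of ps = left-stable min of valid under ps-rank
theorem main_lemma (ps : List String) : ∀ (v0 : String) (rest : List String),
    pvALoop (v0 :: rest) v0 ps
      = (pvMinFold (fun a => ((ps.idxOf a : Nat) : Int)) (some v0) rest).getD v0 := by
  induction ps with
  | nil =>
    intro v0 rest
    rw [pvMinFold_stable]
    · rfl
    · intro x hx
      simp
  | cons p t ih =>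
    intro v0 rest
    by_cases hp : p ∈ (v0 :: rest)
    · have hcont : (v0 :: rest).contains p = true := by simpa using hp
      have hmin : pvMinFold (fun a => (((p :: t).idxOf a : Nat) : Int)) (some v0) rest
          = some p := by
        apply pvMinFold_unique_min
        · simp
        · intro x hxp
          have e : (p :: t).idxOf x = t.idxOf x + 1 := by
            simp [Ne.symm hxp]
          rw [e]; push_cast; omega
        · rcases List.mem_cons.mp hp with h | h
          · exact Or.inr (by rw [h])
          · exact Or.inl h
      simp only [pvALoop]
      rw [if_pos hcont, hmin]
      rfl
    · have hcont : (v0 :: rest).contains p = false := by simpa using hp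
      have hkk : ∀ x y : String, x ∈ (v0 :: rest) → y ∈ (v0 :: rest) →
          ((((p :: t).idxOf x : Nat) : Int) < (((p :: t).idxOf y : Nat) : Int) ↔
            ((t.idxOf x : Nat) : Int) < ((t.idxOf y : Nat) : Int)) := by
        intro x y hx hy
        have hxp : x ≠ p := fun h => hp (h ▸ hx)
        have hyp : y ≠ p := fun h => hp (h ▸ hy)
        have e1 : (p :: t).idxOf x = t.idxOf x + 1 := by simp [Ne.symm hxp]
        have e2 : (p :: t).idxOf y = t.idxOf y + 1 := by simp [Ne.symm hyp]
        rw [e1, e2]; push_cast; omega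
      have hcongr := pvMinFold_congr (fun x => x ∈ (v0 :: rest)) _ _ hkk rest v0
        (by simp) (fun x hx => by simp [hx])
      simp only [pvALoop, hcont, Bool.false_eq_true, if_false]
      rw [hcongr]
      exact ih v0 rest

-- ===== VERDICT (by name: the statement is the Claim_ definition above) =====
theorem fallback_action_py_spec : Claim_equal_fallback_action_py := by
  intro valid _
  unfold Spec_fallback_action_py
  cases valid with
  | nil => rfl
  | cons v0 rest =>
    have hkey : (fun a => ((PySem.List.enumerate pvPriority 0).foldl
          (fun d ip => d.insert ip.2 ip.1) (∅ : PySem.Dict String Int)).getD a 16)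
        = (fun a => ((pvPriority.idxOf a : Nat) : Int)) := by
      funext a
      rw [rank_getD pvPriority 0 ∅ a (by decide)]
      by_cases h : a ∈ pvPriority
      · simp [h]
      · have hlen : pvPriority.idxOf a = pvPriority.length := List.idxOf_eq_length h
        simp [h]
        rfl
    show pvALoop (v0 :: rest) v0 pvPriority = _
    rw [main_lemma]
    simp only [fallback_action_py_alt]
    rw [hkey, min?_eq_pvMinFold]
    rfl
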